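-- pv_equiv track=rewrite | github.com/yuroulan/IEG_Python_Data_Science | Python/iDesign/Topic10RegularExpressions.py | encryptStr
-- ===== SOURCE A (Python) =====
-- def encryptStr(word1, word2):
--     encryptStr =[]
--
--     i, j = 0, len(word2) - 1    # to initialize two pointers
--
--     while i < len(word1) and j >= 0:
--         encryptStr.append(word1[i])
--         encryptStr.append(word2[j])
--
--         i += 1
--         j -= 1
--
--     while i < len(word1):
--         encryptStr.append(word1[i])
--         i += 1
--
--     while j >= 0:
--         encryptStr.append(word2[j])
--         j -= 1
--
--     return ''.join(encryptStr)
-- ===== SOURCE B (Python) =====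
-- def encryptStr(word1, word2):
--     # Positional closed form: output position k gets its character by index
--     # arithmetic alone -- no merging loop over the two inputs.
--     n1, n2 = len(word1), len(word2)
--     n = min(n1, n2)
--
--     def ch(k):
--         if k < 2 * n:
--             return word1[k // 2] if k % 2 == 0 else word2[n2 - 1 - k // 2]
--         if n2 < n1:
--             return word1[k - n]
--         return word2[n2 - 1 - (k - n)]
--
--     return ''.join(ch(k) for k in range(n1 + n2))
-- ===== Notes on version B (the rewrite author's own statement) =====
-- stated objective: alternative
-- what changed: Replaces A's two-pointer merge with three sequential while-loops by a positional closed form: for each output index k a pure index formula selects the source character (word1[k//2], word2[n2-1-k//2], or a tail index), built by a single map over range(n1+n2).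
import Mathlib
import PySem

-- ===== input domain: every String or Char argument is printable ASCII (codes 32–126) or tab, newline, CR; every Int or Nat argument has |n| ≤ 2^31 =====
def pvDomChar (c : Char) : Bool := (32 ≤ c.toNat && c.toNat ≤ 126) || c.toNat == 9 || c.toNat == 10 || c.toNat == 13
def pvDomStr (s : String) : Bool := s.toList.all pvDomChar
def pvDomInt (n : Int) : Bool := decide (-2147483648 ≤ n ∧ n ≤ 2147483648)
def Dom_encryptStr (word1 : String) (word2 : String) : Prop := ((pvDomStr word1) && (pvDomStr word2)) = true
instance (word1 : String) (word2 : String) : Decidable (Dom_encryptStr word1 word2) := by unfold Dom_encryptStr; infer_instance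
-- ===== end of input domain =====

-- B replaces A's two-pointer merge (three sequential while-loops) by a positional
-- closed form: each output index k selects its source character by index arithmetic
-- alone, built by one map over range(n1+n2) (objective: alternative).


-- ===== PORT A =====
-- first while-loop: i ascends through word1, j descends through word2; indexing is
-- guarded in range by the loop condition, so getD is exact here
def loopA1 (l1 l2 : List Char) (i : Nat) (j : Int) (acc : List Char) :
    List Char × Nat × Int :=
  if h : i < l1.length ∧ 0 ≤ j then
    loopA1 l1 l2 (i + 1) (j - 1) (acc ++ [l1.getD i ' ', l2.getD j.toNat ' '])
  else (acc, i, j)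
termination_by l1.length - i
decreasing_by omega

-- second while-loop: remaining characters of word1
def loopA2 (l1 : List Char) (i : Nat) (acc : List Char) : List Char :=
  if h : i < l1.length then loopA2 l1 (i + 1) (acc ++ [l1.getD i ' ']) else acc
termination_by l1.length - i
decreasing_by omega

-- third while-loop: remaining characters of word2, backwards
def loopA3 (l2 : List Char) (j : Int) (acc : List Char) : List Char :=
  if h : 0 ≤ j then loopA3 l2 (j - 1) (acc ++ [l2.getD j.toNat ' ']) else acc
termination_by (j + 1).toNat
decreasing_by omega

def encryptStr (word1 : String) (word2 : String) : String :=
  let l1 := word1.toList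
  let l2 := word2.toList
  String.mk (match loopA1 l1 l2 0 ((l2.length : Int) - 1) [] with
    | (acc, i, j) => loopA3 l2 j (loopA2 l1 i acc))

-- ===== PORT B =====
-- every index fed to getD is provably in range in its reachable branch
-- (the Python indexes the strings directly), so getD with a dummy default is exact
def encryptStr_alt (word1 : String) (word2 : String) : String :=
  let l1 := word1.toList
  let l2 := word2.toList
  let n1 := l1.length
  let n2 := l2.length
  let n := min n1 n2
  let ch := fun (k : Nat) =>
    if k < 2 * n then
      (if k % 2 = 0 then l1.getD (k / 2) ' ' else l2.getD (n2 - 1 - k / 2) ' ')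
    else if n2 < n1 then l1.getD (k - n) ' '
    else l2.getD (n2 - 1 - (k - n)) ' '
  String.mk ((List.range (n1 + n2)).map ch)

-- ===== PRECONDITION & SPEC =====
def Spec_encryptStr (word1 : String) (word2 : String) (out : String) : Prop := out = encryptStr_alt word1 word2
instance (word1 : String) (word2 : String) (out : String) : Decidable (Spec_encryptStr word1 word2 out) := by unfold Spec_encryptStr; infer_instance

-- ===== CLAIM (what is proved, stated in full; the proofs are below) =====
def Claim_equal_encryptStr : Prop := ∀ (word1 : String) (word2 : String), Dom_encryptStr word1 word2 → Spec_encryptStr word1 word2 (encryptStr word1 word2)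

-- ===== LEMMAS AND PROOFS =====

-- the common mathematical shape: interleave, then whichever tail is left over
def gfun : List Char → List Char → List Char
  | [], y => y
  | x, [] => x
  | a :: x, b :: y => a :: b :: gfun x y

lemma gfun_nil_right (x : List Char) : gfun x [] = x := by
  cases x <;> rfl

lemma gfun_length (x : List Char) : ∀ y : List Char, (gfun x y).length = x.length + y.length := by
  induction x with
  | nil => intro y; simp [gfun]
  | cons a x ihx =>
    intro y
    cases y with
    | nil => simp [gfun_nil_right]
    | cons b y => simp [gfun, ihx y]; omega

-- positional characterization of gfun: which source character sits at output index k
lemma gfun_getD (x : List Char) : ∀ (y : List Char) (k : Nat), k < x.length + y.length →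
    (gfun x y).getD k ' ' =
      if k < 2 * min x.length y.length then
        (if k % 2 = 0 then x.getD (k / 2) ' ' else y.getD (k / 2) ' ')
      else if y.length < x.length then x.getD (k - y.length) ' '
      else y.getD (k - x.length) ' ' := by
  induction x with
  | nil =>
    intro y k hk
    have h1 : ¬ k < 2 * min ([] : List Char).length y.length := by simp
    have h2 : ¬ y.length < ([] : List Char).length := by simp
    rw [if_neg h1, if_neg h2]
    simp [gfun]
  | cons a x ihx =>
    intro y k hk
    cases y with
    | nil =>
      rw [if_neg (by simp), if_pos (by simp), gfun_nil_right]
      simp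
    | cons b y =>
      match k with
      | 0 =>
        have h1 : 0 < 2 * min (a :: x).length (b :: y).length := by simp only [List.length_cons]; omega
        rw [show gfun (a :: x) (b :: y) = a :: b :: gfun x y from rfl]
        rw [if_pos h1]
        simp
      | 1 =>
        have h1 : 1 < 2 * min (a :: x).length (b :: y).length := by simp only [List.length_cons]; omega
        rw [show gfun (a :: x) (b :: y) = a :: b :: gfun x y from rfl]
        rw [if_pos h1]
        simp
      | (k + 2) =>
        rw [show gfun (a :: x) (b :: y) = a :: b :: gfun x y from rfl]
        have hk' : k < x.length + y.length := by
          simp only [List.length_cons] at hk; omega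
        rw [List.getD_cons_succ, List.getD_cons_succ, ihx y k hk']
        by_cases h1 : k < 2 * min x.length y.length
        · have h1' : k + 2 < 2 * min (a :: x).length (b :: y).length := by
            simp only [List.length_cons]; omega
          rw [if_pos h1, if_pos h1']
          have hmod : (k + 2) % 2 = k % 2 := by omega
          have hdiv : (k + 2) / 2 = k / 2 + 1 := by omega
          rw [hmod, hdiv]
          by_cases he : k % 2 = 0
          · rw [if_pos he, if_pos he, List.getD_cons_succ]
          · rw [if_neg he, if_neg he, List.getD_cons_succ]
        · have h1' : ¬ k + 2 < 2 * min (a :: x).length (b :: y).length := by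
            simp only [List.length_cons]; omega
          rw [if_neg h1, if_neg h1']
          by_cases h2 : y.length < x.length
          · have h2' : (b :: y).length < (a :: x).length := by
              simp only [List.length_cons]; omega
            rw [if_pos h2, if_pos h2']
            have hge : y.length ≤ k := by omega
            have : k + 2 - (b :: y).length = (k - y.length) + 1 := by
              simp only [List.length_cons]; omega
            rw [this, List.getD_cons_succ]
          · have h2' : ¬ (b :: y).length < (a :: x).length := by
              simp only [List.length_cons]; omega
            rw [if_neg h2, if_neg h2']
            have hge : x.length ≤ k := by omega
            have : k + 2 - (a :: x).length = (k - x.length) + 1 := by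
              simp only [List.length_cons]; omega
            rw [this, List.getD_cons_succ]

lemma take_rev_cons (l2 : List Char) (j : Int) (h0 : 0 ≤ j) (h1 : j < (l2.length : Int)) :
    (l2.take (j + 1).toNat).reverse = l2.getD j.toNat ' ' :: (l2.take j.toNat).reverse := by
  have hn : (j + 1).toNat = j.toNat + 1 := by omega
  have hlt : j.toNat < l2.length := by omega
  rw [hn, List.take_succ, List.getD_eq_getElem _ _ hlt]
  simp [List.getElem?_eq_getElem hlt]

lemma loopA2_spec (l1 : List Char) : ∀ i acc, loopA2 l1 i acc = acc ++ l1.drop i := by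
  intro i
  induction' hm : l1.length - i using Nat.strong_induction_on with m ih generalizing i
  subst hm
  intro acc
  rw [loopA2]
  split_ifs with h
  · rw [ih (l1.length - (i + 1)) (by omega) (i + 1) rfl]
    rw [List.drop_eq_getElem_cons h, List.getD_eq_getElem l1 ' ' h]
    simp
  · rw [List.drop_of_length_le (by omega : l1.length ≤ i)]
    simp

lemma loopA3_spec (l2 : List Char) : ∀ (j : Int) acc, j < (l2.length : Int) →
    loopA3 l2 j acc = acc ++ (l2.take (j + 1).toNat).reverse := by
  intro j
  induction' hm : (j + 1).toNat using Nat.strong_induction_on with m ih generalizing j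
  subst hm
  intro acc hj
  rw [loopA3]
  split_ifs with h
  · rw [ih ((j - 1) + 1).toNat (by omega) (j - 1) rfl _ (by omega)]
    rw [take_rev_cons l2 j h hj]
    simp
  · have h0 : (j + 1).toNat = 0 := by omega
    simp [h0]

lemma loopA1_spec (l1 l2 : List Char) : ∀ (i : Nat) (j : Int) (acc : List Char),
    j < (l2.length : Int) →
    (match loopA1 l1 l2 i j acc with
     | (acc', i', j') => loopA3 l2 j' (loopA2 l1 i' acc')) =
      acc ++ gfun (l1.drop i) ((l2.take (j + 1).toNat).reverse) := by
  intro i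
  induction' hm : l1.length - i using Nat.strong_induction_on with m ih generalizing i
  subst hm
  intro j acc hj
  rw [loopA1]
  split_ifs with h
  · obtain ⟨hi, hj0⟩ := h
    rw [ih (l1.length - (i + 1)) (by omega) (i + 1) rfl (j - 1) _ (by omega)]
    have hd : l1.drop i = l1[i] :: l1.drop (i + 1) := List.drop_eq_getElem_cons hi
    rw [take_rev_cons l2 j hj0 hj, hd]
    have : j - 1 + 1 = j := by omega
    rw [this]
    simp [gfun, List.getElem?_eq_getElem hi]
  · simp only [not_and, not_le] at h
    change loopA3 l2 j (loopA2 l1 i acc) = _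
    rw [loopA2_spec, loopA3_spec _ _ _ hj]
    by_cases hi : i < l1.length
    · have hj0 : j < 0 := h hi
      have h0 : (j + 1).toNat = 0 := by omega
      simp [h0, gfun_nil_right]
    · rw [List.drop_of_length_le (by omega : l1.length ≤ i)]
      simp [gfun]

-- B's positional formula produces exactly gfun l1 l2.reverse
lemma bside (l1 l2 : List Char) :
    (List.range (l1.length + l2.length)).map (fun (k : Nat) =>
      if k < 2 * min l1.length l2.length then
        (if k % 2 = 0 then l1.getD (k / 2) ' '
         else l2.getD (l2.length - 1 - k / 2) ' ')
      else if l2.length < l1.length then l1.getD (k - min l1.length l2.length) ' '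
      else l2.getD (l2.length - 1 - (k - min l1.length l2.length)) ' ') =
    gfun l1 l2.reverse := by
  apply List.ext_getElem
  · simp [gfun_length]
  · intro k hk1 hk2
    have hk : k < l1.length + l2.length := by simpa using hk1
    have hrevD : ∀ (i : Nat), i < l2.length →
        l2.reverse.getD i ' ' = l2.getD (l2.length - 1 - i) ' ' := by
      intro i hi
      rw [List.getD_eq_getElem _ _ (by simpa using hi),
          List.getD_eq_getElem _ _ (by omega), List.getElem_reverse]
    have hmain := gfun_getD l1 l2.reverse k (by simpa using hk)
    rw [List.getElem_map, List.getElem_range]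
    rw [show (gfun l1 l2.reverse)[k] = (gfun l1 l2.reverse).getD k ' ' from
      (List.getD_eq_getElem _ _ hk2).symm, hmain]
    simp only [List.length_reverse]
    by_cases h1 : k < 2 * min l1.length l2.length
    · rw [if_pos h1, if_pos h1]
      by_cases he : k % 2 = 0
      · rw [if_pos he, if_pos he]
      · rw [if_neg he, if_neg he, hrevD (k / 2) (by omega)]
    · rw [if_neg h1, if_neg h1]
      by_cases h2 : l2.length < l1.length
      · rw [if_pos h2, if_pos h2]
        have : min l1.length l2.length = l2.length := by omega
        rw [this]
      · rw [if_neg h2, if_neg h2]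
        have : min l1.length l2.length = l1.length := by omega
        rw [this, hrevD (k - l1.length) (by omega)]

-- ===== VERDICT (by name: the statement is the Claim_ definition above) =====
theorem encryptStr_spec : Claim_equal_encryptStr := by
  intro word1 word2 _
  unfold Spec_encryptStr
  show String.mk (match loopA1 word1.toList word2.toList 0 ((word2.toList.length : Int) - 1) [] with
      | (acc, i, j) => loopA3 word2.toList j (loopA2 word1.toList i acc)) =
    String.mk ((List.range (word1.toList.length + word2.toList.length)).map (fun (k : Nat) =>
      if k < 2 * min word1.toList.length word2.toList.length then
        (if k % 2 = 0 then word1.toList.getD (k / 2) ' '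
         else word2.toList.getD (word2.toList.length - 1 - k / 2) ' ')
      else if word2.toList.length < word1.toList.length then
        word1.toList.getD (k - min word1.toList.length word2.toList.length) ' '
      else word2.toList.getD (word2.toList.length - 1 -
        (k - min word1.toList.length word2.toList.length)) ' '))
  rw [loopA1_spec word1.toList word2.toList 0 ((word2.toList.length : Int) - 1) [] (by omega)]
  have ht : ((word2.toList.length : Int) - 1 + 1).toNat = word2.toList.length := by omega
  rw [ht, List.take_length, bside word1.toList word2.toList]
  simp
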